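-- pv_equiv track=rewrite | github.com/ogchen/nanofold | nanofold/data_processing/sto_parser.py | compute_deletion_matrix
-- ===== SOURCE A (Python) =====
-- def compute_deletion_matrix(alignments):
--     query = alignments[0]
--     deletion_matrix = []
--
--     for sequence in alignments:
--         deletion_vec = []
--         deletion_count = 0
--         for seq_res, query_res in zip(sequence, query):
--             if seq_res != "-" and query_res == "-":
--                 deletion_count += 1
--             elif query_res != "-":
--                 deletion_vec.append(deletion_count)
--                 deletion_count = 0
--         deletion_matrix.append(deletion_vec)
--     return deletion_matrix
-- ===== SOURCE B (Python) =====
-- def compute_deletion_matrix(alignments):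
--     query = alignments[0]
--     # precompute columns: (index of non-gap query char, gap indices since previous column)
--     cols = []
--     gaps = []
--     for i, q in enumerate(query):
--         if q == "-":
--             gaps.append(i)
--         else:
--             cols.append((i, gaps))
--             gaps = []
--     matrix = []
--     for seq in alignments:
--         n = len(seq)
--         matrix.append([sum(1 for g in gs if seq[g] != "-")
--                        for (i, gs) in cols if i < n])
--     return matrix
-- ===== Notes on version B (the rewrite author's own statement) =====
-- stated objective: alternative
-- what changed: B scans the query once to precompute the non-gap column indices with their preceding gap positions, then each row is built by counting non-gap sequence chars at those precomputed gap positions (capped at the row length), instead of A's per-row simultaneous walk over zip(sequence, query) with a running counter.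
-- outside the precondition, e.g. on compute_deletion_matrix([]): A raises IndexError, B raises IndexError
import Mathlib
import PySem

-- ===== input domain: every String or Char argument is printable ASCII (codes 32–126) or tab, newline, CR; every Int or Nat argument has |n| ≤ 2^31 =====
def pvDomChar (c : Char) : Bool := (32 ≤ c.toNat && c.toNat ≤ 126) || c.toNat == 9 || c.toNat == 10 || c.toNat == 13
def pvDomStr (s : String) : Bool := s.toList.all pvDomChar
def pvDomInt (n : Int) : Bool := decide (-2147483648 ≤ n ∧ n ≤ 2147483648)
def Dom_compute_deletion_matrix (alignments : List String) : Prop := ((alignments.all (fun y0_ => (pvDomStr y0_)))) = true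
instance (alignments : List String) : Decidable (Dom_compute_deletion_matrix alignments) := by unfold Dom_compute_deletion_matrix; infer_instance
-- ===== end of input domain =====

-- B precomputes the query's column structure once instead of re-scanning the query per row; proved equal to A on nonempty input.

-- ===== PORT A =====
-- one step of A's inner loop over zip(sequence, query)
def stepA (st : List Int × Int) (p : Char × Char) : List Int × Int :=
  if p.1 ≠ '-' ∧ p.2 = '-' then (st.1, st.2 + 1)
  else if p.2 ≠ '-' then (st.1 ++ [st.2], 0)
  else st

def compute_deletion_matrix (alignments : List String) : List (List Int) :=
  let query := (PySem.List.pyGet? alignments 0).getD ""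
  alignments.foldl
    (fun mat sequence =>
      mat ++ [((List.zip sequence.toList query.toList).foldl stepA ([], 0)).1])
    []

-- ===== PORT B =====
-- columns of the query: (index of non-gap char, gap indices since the previous column)
def buildCols : List Char → Nat → List Nat → List (Nat × List Nat)
  | [], _, _ => []
  | q :: rest, i, gaps =>
    if q = '-' then buildCols rest (i + 1) (gaps ++ [i])
    else (i, gaps) :: buildCols rest (i + 1) []

-- sum(1 for g in gs if seq[g] != "-")
def rowCount (seq : List Char) (gs : List Nat) : Int :=
  ((gs.filter (fun g => seq.getD g ' ' != '-')).length : Int)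

def compute_deletion_matrix_alt (alignments : List String) : List (List Int) :=
  let query := (PySem.List.pyGet? alignments 0).getD ""
  let cols := buildCols query.toList 0 []
  alignments.map (fun s =>
    (cols.filter (fun p => p.1 < s.toList.length)).map (fun p => rowCount s.toList p.2))

-- ===== PRECONDITION & SPEC =====
-- Pre_ excludes only the empty list, on which the Python A raises IndexError at alignments[0].
def Pre_compute_deletion_matrix (alignments : List String) : Prop := alignments ≠ []
instance (alignments : List String) : Decidable (Pre_compute_deletion_matrix alignments) := by unfold Pre_compute_deletion_matrix; infer_instance
def pvWitness_compute_deletion_matrix : List String := ["A-CD", "AACD", "B-"]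

def Spec_compute_deletion_matrix (alignments : List String) (out : List (List Int)) : Prop := out = compute_deletion_matrix_alt alignments
instance (alignments : List String) (out : List (List Int)) : Decidable (Spec_compute_deletion_matrix alignments out) := by unfold Spec_compute_deletion_matrix; infer_instance

-- ===== CLAIM (what is proved, stated in full; the proofs are below) =====
def Claim_equal_compute_deletion_matrix : Prop := ∀ (alignments : List String), Dom_compute_deletion_matrix alignments → Pre_compute_deletion_matrix alignments → Spec_compute_deletion_matrix alignments (compute_deletion_matrix alignments)

-- ===== LEMMAS AND PROOFS =====

-- every column index produced by buildCols is ≥ the starting index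
lemma buildCols_ge (qrest : List Char) : ∀ (i : Nat) (gaps : List Nat) (p : Nat × List Nat),
    p ∈ buildCols qrest i gaps → i ≤ p.1 := by
  induction qrest with
  | nil => intro i gaps p hp; simp [buildCols] at hp
  | cons q qs ih =>
    intro i gaps p hp
    by_cases hq : q = '-'
    · simp [buildCols, hq] at hp
      exact Nat.le_of_succ_le (ih (i + 1) (gaps ++ [i]) p hp)
    · simp [buildCols, hq] at hp
      rcases hp with hp | hp
      · simp [hp]
      · exact Nat.le_of_succ_le (ih (i + 1) [] p hp)

lemma rowCount_append (seq : List Char) (gs : List Nat) (i : Nat) :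
    rowCount seq (gs ++ [i]) =
      rowCount seq gs + (if seq.getD i ' ' != '-' then 1 else 0) := by
  simp [rowCount, List.filter_append, List.filter]
  split <;> simp_all

lemma row_eq (seqfull : List Char) : ∀ (qrest : List Char) (i : Nat) (gaps : List Nat) (vec : List Int),
    ((List.zip (seqfull.drop i) qrest).foldl stepA (vec, rowCount seqfull gaps)).1
      = vec ++ ((buildCols qrest i gaps).filter (fun p => p.1 < seqfull.length)).map
          (fun p => rowCount seqfull p.2) := by
  intro qrest
  induction qrest with
  | nil => intro i gaps vec; simp [buildCols]
  | cons q qs ih =>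
    intro i gaps vec
    cases hd : seqfull.drop i with
    | nil =>
      have hlen : seqfull.length ≤ i := by
        have := List.length_drop (l := seqfull) (i := i)
        rw [hd] at this; simp at this; omega
      have hfil : ((buildCols (q :: qs) i gaps).filter (fun p => p.1 < seqfull.length)) = [] := by
        rw [List.filter_eq_nil_iff]
        intro p hp
        have := buildCols_ge (q :: qs) i gaps p hp
        simp; omega
      simp [hfil]
    | cons s ss =>
      have hi : i < seqfull.length := by
        have := List.length_drop (l := seqfull) (i := i)
        rw [hd] at this; simp at this; omega
      have hgetd : seqfull.getD i ' ' = s := by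
        have h0 : seqfull[i]? = some s := by
          have h1 : (List.drop i seqfull)[0]? = seqfull[i + 0]? := List.getElem?_drop
          rw [hd] at h1; simpa using h1.symm
        simp [List.getD, h0]
      have hdrop : seqfull.drop (i + 1) = ss := by
        have : seqfull.drop (i + 1) = (seqfull.drop i).drop 1 := by
          rw [List.drop_drop]
        rw [this, hd]; simp
      by_cases hq : q = '-'
      · -- gap column: count may grow, no entry emitted
        have hstep : stepA (vec, rowCount seqfull gaps) (s, q)
            = (vec, rowCount seqfull (gaps ++ [i])) := by
          rw [rowCount_append, hgetd]
          by_cases hs : s = '-'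
          · simp [stepA, hq, hs]
          · simp [stepA, hq, hs]
        rw [List.zip_cons_cons, List.foldl_cons, hstep, ← hdrop, ih (i + 1) (gaps ++ [i]) vec]
        simp [buildCols, hq]
      · -- real column: emit the count, reset
        have hstep : stepA (vec, rowCount seqfull gaps) (s, q)
            = (vec ++ [rowCount seqfull gaps], rowCount seqfull []) := by
          simp [stepA, hq, rowCount]
        rw [List.zip_cons_cons, List.foldl_cons, hstep, ← hdrop, ih (i + 1) [] (vec ++ [rowCount seqfull gaps])]
        simp [buildCols, hq, hi]

lemma foldl_append_map (f : String → List Int) (l : List String) :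
    ∀ (acc : List (List Int)),
      l.foldl (fun mat s => mat ++ [f s]) acc = acc ++ l.map f := by
  induction l with
  | nil => intro acc; simp
  | cons x xs ih => intro acc; simp [List.foldl_cons, ih]

-- ===== VERDICT (by name: the statement is the Claim_ definition above) =====
theorem compute_deletion_matrix_spec : Claim_equal_compute_deletion_matrix := by
  intro alignments _ _
  unfold Spec_compute_deletion_matrix compute_deletion_matrix compute_deletion_matrix_alt
  rw [foldl_append_map]
  simp only [List.nil_append]
  apply List.map_congr_left
  intro s _
  have h := row_eq s.toList ((PySem.List.pyGet? alignments 0).getD "").toList 0 [] []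
  simpa [rowCount] using h
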